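-- pv_equiv track=rewrite | github.com/haydenji0731/off-target-probe-checker | otpc/otpc/track.py | convert_md2bit_nucmer_del
-- ===== SOURCE A (Python) =====
-- def convert_md2bit_nucmer_del(s, tstart):
--     running = ""
--     bit_s = ""
--     ignore = False
--     mismatch_info = []
--     for c in s:
--         if c.isdigit():
--             ignore = False
--             running += c
--         else:
--             if ignore: continue
--             if c == '^':
--                 if len(running) > 0:
--                     bit_s += '1' * int(running)
--                 running = ""
--                 ignore = True
--                 continue
--             else:
--                 if len(running) > 0:
--                     bit_s += '1' * int(running)
--                 mismatch_info.append(len(bit_s))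
--                 bit_s += '0'
--                 running = ""
--     if len(running) > 0:
--         bit_s += '1' * (int(running) - tstart)
--     return bit_s, mismatch_info
-- ===== SOURCE B (Python) =====
-- def convert_md2bit_nucmer_del(s, tstart):
--     # Tokenizer: digit runs -> '1'*value chunks, '^'-runs swallow following
--     # non-digits, any other char is a mismatch; chunks joined at the end.
--     parts = []
--     mismatch_info = []
--     pos = 0
--     i = 0
--     n = len(s)
--     while i < n:
--         c = s[i]
--         if c.isdigit():
--             j = i
--             while j < n and s[j].isdigit():
--                 j += 1
--             val = int(s[i:j])
--             if j == n:
--                 val -= tstart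
--             parts.append('1' * val)
--             pos += max(val, 0)
--             i = j
--         elif c == '^':
--             i += 1
--             while i < n and not s[i].isdigit():
--                 i += 1
--         else:
--             mismatch_info.append(pos)
--             parts.append('0')
--             pos += 1
--             i += 1
--     return ''.join(parts), mismatch_info
-- ===== Notes on version B (the rewrite author's own statement) =====
-- stated objective: alternative
-- what changed: B tokenizes the MD string (maximal digit runs, '^'-deletion runs swallowed wholesale, single mismatch chars) in one index-driven while-loop and joins '1'*value chunks at the end, instead of A's char-by-char scan with a running digit buffer and an ignore flag.
import Mathlib
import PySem

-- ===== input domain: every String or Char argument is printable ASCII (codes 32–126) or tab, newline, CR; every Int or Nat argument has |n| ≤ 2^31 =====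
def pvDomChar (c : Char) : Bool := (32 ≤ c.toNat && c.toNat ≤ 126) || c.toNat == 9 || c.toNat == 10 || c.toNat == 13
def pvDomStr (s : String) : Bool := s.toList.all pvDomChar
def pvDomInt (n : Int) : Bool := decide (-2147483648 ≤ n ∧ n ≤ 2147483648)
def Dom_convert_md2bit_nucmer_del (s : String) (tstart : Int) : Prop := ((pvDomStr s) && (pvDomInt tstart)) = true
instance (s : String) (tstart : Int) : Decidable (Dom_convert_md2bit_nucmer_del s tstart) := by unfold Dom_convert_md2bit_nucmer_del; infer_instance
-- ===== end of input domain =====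

-- B re-parses the MD string as a token stream (digit runs / '^'-deletion runs / mismatch chars)
-- instead of A's char-by-char scan with an ignore flag and a running buffer; objective: alternative.

-- int(cs) for cs a nonempty list of digit chars (the only way either program calls int);
-- the .getD 0 default is unreachable there (int of a nonempty digit string never raises).
def pvIntOf (cs : List Char) : Int := (PySem.Int.ofChars? cs).getD 0

-- ===== PORT A =====
-- one iteration of A's for-loop; state = (running, bit_s, ignore, mismatch_info)
def pvAstep : List Char × List Char × Bool × List Int → Char →
    List Char × List Char × Bool × List Int
  | (running, bit, ignore, mm), c =>
  if PySem.Chars.isdigit c then (running ++ [c], bit, false, mm)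
  else if ignore then (running, bit, ignore, mm)
  else if c = '^' then
    ([], (if running.length > 0 then bit ++ List.replicate (pvIntOf running).toNat '1' else bit), true, mm)
  else
    let bit1 := if running.length > 0 then bit ++ List.replicate (pvIntOf running).toNat '1' else bit
    ([], bit1 ++ ['0'], false, mm ++ [(bit1.length : Int)])

-- the trailing "if len(running) > 0: bit_s += '1' * (int(running) - tstart)"
def pvAfin (tstart : Int) (st : List Char × List Char × Bool × List Int) : List Char × List Int :=
  ((if st.1.length > 0 then st.2.1 ++ List.replicate (pvIntOf st.1 - tstart).toNat '1' else st.2.1), st.2.2.2)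

def convert_md2bit_nucmer_del (s : String) (tstart : Int) : String × List Int :=
  let r := pvAfin tstart (s.toList.foldl pvAstep ([], [], false, []))
  (String.mk r.1, r.2)

-- ===== PORT B =====
-- B's while-loop as recursion on the remaining chars; parts/mm are the growing
-- Python lists, pos = len of the bitstring built so far ('1'*v for v<0 is empty, hence .toNat).
def pvBgo (tstart : Int) (cs : List Char) (pos : Nat) (parts : List (List Char)) (mm : List Int) :
    List (List Char) × List Int :=
  match cs with
  | [] => (parts, mm)
  | c :: rest =>
    if hdig : PySem.Chars.isdigit c then
      let rest' := (c :: rest).dropWhile PySem.Chars.isdigit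
      let v0 := pvIntOf ((c :: rest).takeWhile PySem.Chars.isdigit)
      let v := if rest' = [] then v0 - tstart else v0
      pvBgo tstart rest' (pos + v.toNat) (parts ++ [List.replicate v.toNat '1']) mm
    else if c = '^' then
      pvBgo tstart (rest.dropWhile (fun d => !PySem.Chars.isdigit d)) pos parts mm
    else
      pvBgo tstart rest (pos + 1) (parts ++ [['0']]) (mm ++ [(pos : Int)])
termination_by cs.length
decreasing_by
  · simp only [List.dropWhile_cons, hdig, if_true]
    have := List.length_dropWhile_le PySem.Chars.isdigit rest
    simp; omega
  · have := List.length_dropWhile_le (fun d => !PySem.Chars.isdigit d) rest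
    simp; omega
  · simp

def convert_md2bit_nucmer_del_alt (s : String) (tstart : Int) : String × List Int :=
  let r := pvBgo tstart s.toList 0 [] []
  (String.mk r.1.flatten, r.2)    -- ''.join(parts) = flatten of the chunks

-- ===== PRECONDITION & SPEC =====
def Spec_convert_md2bit_nucmer_del (s : String) (tstart : Int) (out : String × List Int) : Prop := out = convert_md2bit_nucmer_del_alt s tstart
instance (s : String) (tstart : Int) (out : String × List Int) : Decidable (Spec_convert_md2bit_nucmer_del s tstart out) := by unfold Spec_convert_md2bit_nucmer_del; infer_instance

-- ===== CLAIM (what is proved, stated in full; the proofs are below) =====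
def Claim_equal_convert_md2bit_nucmer_del : Prop := ∀ (s : String) (tstart : Int), Dom_convert_md2bit_nucmer_del s tstart → Spec_convert_md2bit_nucmer_del s tstart (convert_md2bit_nucmer_del s tstart)

-- ===== LEMMAS AND PROOFS =====

-- a run of digit chars just accumulates into `running` (and clears `ignore` when nonempty)
lemma pvA_digits (ds : List Char) (h : ∀ c ∈ ds, PySem.Chars.isdigit c = true) :
    ∀ running bit ig mm, List.foldl pvAstep (running, bit, ig, mm) ds
      = (running ++ ds, bit, (if ds.isEmpty then ig else false), mm) := by
  induction ds with
  | nil => intro running bit ig mm; simp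
  | cons d ds ih =>
    intro running bit ig mm
    have hd : PySem.Chars.isdigit d = true := h d (by simp)
    simp only [List.foldl_cons, pvAstep, hd, if_true]
    rw [ih (fun c hc => h c (by simp [hc]))]
    simp

-- while `ignore` is set, non-digit chars are skipped without touching the state
lemma pvA_skip (xs : List Char) (h : ∀ c ∈ xs, PySem.Chars.isdigit c = false) :
    ∀ running bit mm, List.foldl pvAstep (running, bit, true, mm) xs = (running, bit, true, mm) := by
  induction xs with
  | nil => intro running bit mm; simp
  | cons x xs ih =>
    intro running bit mm
    have hx : PySem.Chars.isdigit x = false := h x (by simp)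
    simp only [List.foldl_cons, pvAstep, hx]
    simp only [Bool.false_eq_true, if_false, if_true]
    exact ih (fun c hc => h c (by simp [hc])) _ _ _

-- once running = [] and the next char (if any) is a digit, the ignore flag does not affect the outcome
lemma pvA_ignore_irrel (t : Int) (cs : List Char) (h : ∀ c, cs.head? = some c → PySem.Chars.isdigit c = true) :
    ∀ bit mm, pvAfin t (List.foldl pvAstep (([] : List Char), bit, true, mm) cs)
      = pvAfin t (List.foldl pvAstep (([] : List Char), bit, false, mm) cs) := by
  cases cs with
  | nil => intro _ _; simp [pvAfin]
  | cons c rest =>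
    intro bit mm
    have hc : PySem.Chars.isdigit c = true := h c rfl
    simp only [List.foldl_cons, pvAstep, hc, if_true]

-- main invariant: from a flushed A-state (running=[], ignore=false) with bit = parts.flatten,
-- finishing A's scan equals B's tokenizer continued at position bit.length
lemma pvMain : ∀ n (cs : List Char), cs.length ≤ n → ∀ (t : Int) (parts : List (List Char)) mm,
    pvAfin t (List.foldl pvAstep (([] : List Char), parts.flatten, false, mm) cs)
      = ((pvBgo t cs parts.flatten.length parts mm).1.flatten, (pvBgo t cs parts.flatten.length parts mm).2) := by
  intro n
  induction n with
  | zero =>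
    intro cs hlen t parts mm
    have : cs = [] := List.length_eq_zero_iff.mp (Nat.le_zero.mp hlen)
    subst this
    simp [pvBgo, pvAfin]
  | succ n ih =>
    intro cs hlen t parts mm
    cases hcs : cs with
    | nil => simp [pvBgo, pvAfin]
    | cons c rest =>
      subst hcs
      by_cases hd : PySem.Chars.isdigit c = true
      · -- digit run
        set ds := (c :: rest).takeWhile PySem.Chars.isdigit with hds
        set rest' := (c :: rest).dropWhile PySem.Chars.isdigit with hrest'
        have hsplit : ds ++ rest' = c :: rest := List.takeWhile_append_dropWhile
        have hdsne : ds ≠ [] := by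
          simp [hds, List.takeWhile_cons, hd]
        have hdsdig : ∀ x ∈ ds, PySem.Chars.isdigit x = true := fun x hx => List.mem_takeWhile_imp hx
        have hlens : ds.length + rest'.length = rest.length + 1 := by
          have := congrArg List.length hsplit
          simpa using this
        have hdspos : 0 < ds.length := List.length_pos_iff.mpr hdsne
        -- A side: absorb the digit run
        have hA : List.foldl pvAstep (([] : List Char), parts.flatten, false, mm) (c :: rest)
            = List.foldl pvAstep (ds, parts.flatten, false, mm) rest' := by
          rw [← hsplit, List.foldl_append, pvA_digits ds hdsdig]
          simp [hdsne]
        -- B side: the digit token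
        have hB : pvBgo t (c :: rest) parts.flatten.length parts mm
            = pvBgo t rest' (parts.flatten.length + (if rest' = [] then pvIntOf ds - t else pvIntOf ds).toNat)
                (parts ++ [List.replicate (if rest' = [] then pvIntOf ds - t else pvIntOf ds).toNat '1']) mm := by
          rw [pvBgo]
          simp only [hd, ← hds, ← hrest']
          simp
        rw [hA, hB]
        cases hre : rest' with
        | nil =>
          simp only [List.foldl_nil, if_pos rfl]
          simp [pvAfin, hdsne, pvBgo, List.length_pos_iff]
        | cons c' r2 =>
          have hc' : PySem.Chars.isdigit c' = false := by
            have := List.head?_dropWhile_not PySem.Chars.isdigit (c :: rest)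
            rw [← hrest', hre] at this
            simpa using this
          rw [hre] at hlens
          simp only [if_neg (by simp : ¬(c' :: r2 = []))]
          set ones := List.replicate (pvIntOf ds).toNat '1' with hones
          have honeslen : ones.length = (pvIntOf ds).toNat := by simp [hones]
          have hcary : PySem.Chars.isdigit '^' = false := by decide
          by_cases hcar : c' = '^'
          · -- flush + set ignore, then skip the deletion run
            have hstep : pvAstep (ds, parts.flatten, false, mm) c'
                = ([], parts.flatten ++ ones, true, mm) := by
              simp [pvAstep, hc', hcar, hcary, hdspos, hones]
            set r3 := r2.dropWhile (fun d => !PySem.Chars.isdigit d) with hr3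
            have hsplit2 : r2.takeWhile (fun d => !PySem.Chars.isdigit d) ++ r3 = r2 :=
              List.takeWhile_append_dropWhile
            have hskipdig : ∀ x ∈ r2.takeWhile (fun d => !PySem.Chars.isdigit d),
                PySem.Chars.isdigit x = false := by
              intro x hx; have := List.mem_takeWhile_imp hx; simpa using this
            have hr3head : ∀ x, r3.head? = some x → PySem.Chars.isdigit x = true := by
              intro x hx
              have := List.head?_dropWhile_not (fun d => !PySem.Chars.isdigit d) r2
              rw [← hr3, hx] at this; simpa using this
            have hr3len : r3.length ≤ n := by
              have := List.length_dropWhile_le (fun d => !PySem.Chars.isdigit d) r2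
              rw [← hr3] at this
              simp at hlen hlens; omega
            have ihr3 := ih r3 hr3len t (parts ++ [ones]) mm
            have hflat : (parts ++ [ones]).flatten = parts.flatten ++ ones := by simp
            rw [hflat] at ihr3
            calc pvAfin t (List.foldl pvAstep (ds, parts.flatten, false, mm) (c' :: r2))
                = pvAfin t (List.foldl pvAstep (([] : List Char), parts.flatten ++ ones, true, mm) r2) := by
                  rw [List.foldl_cons, hstep]
              _ = pvAfin t (List.foldl pvAstep (([] : List Char), parts.flatten ++ ones, true, mm) r3) := by
                  rw [← hsplit2, List.foldl_append, pvA_skip _ hskipdig]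
              _ = pvAfin t (List.foldl pvAstep (([] : List Char), parts.flatten ++ ones, false, mm) r3) :=
                  pvA_ignore_irrel t r3 hr3head _ _
              _ = _ := by
                  rw [ihr3]
                  have : pvBgo t (c' :: r2) (parts.flatten.length + (pvIntOf ds).toNat) (parts ++ [ones]) mm
                      = pvBgo t r3 (parts.flatten.length + (pvIntOf ds).toNat) (parts ++ [ones]) mm := by
                    rw [pvBgo]
                    simp [hc', hcar, hcary, ← hr3]
                  rw [this]
                  have hl : (parts.flatten ++ ones).length = parts.flatten.length + (pvIntOf ds).toNat := by
                    simp [honeslen]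
                  rw [hl]
          · -- mismatch char
            have hstep : pvAstep (ds, parts.flatten, false, mm) c'
                = ([], (parts.flatten ++ ones) ++ ['0'], false, mm ++ [(((parts.flatten ++ ones).length : Nat) : Int)]) := by
              simp [pvAstep, hc', hcar, hcary, hdspos, hones]
            have hr2len : r2.length ≤ n := by simp at hlen hlens; omega
            have ihr2 := ih r2 hr2len t (parts ++ [ones, ['0']]) (mm ++ [(((parts.flatten ++ ones).length : Nat) : Int)])
            have hflat : (parts ++ [ones, ['0']]).flatten = (parts.flatten ++ ones) ++ ['0'] := by simp
            rw [hflat] at ihr2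
            rw [List.foldl_cons, hstep, ihr2]
            have : pvBgo t (c' :: r2) (parts.flatten.length + (pvIntOf ds).toNat) (parts ++ [ones]) mm
                = pvBgo t r2 (parts.flatten.length + (pvIntOf ds).toNat + 1) (parts ++ [ones] ++ [['0']])
                    (mm ++ [((parts.flatten.length + (pvIntOf ds).toNat : Nat) : Int)]) := by
              rw [pvBgo]
              simp [hc', hcar]
            rw [this]
            have h1 : ((parts.flatten ++ ones) ++ ['0']).length = parts.flatten.length + (pvIntOf ds).toNat + 1 := by
              simp [honeslen] <;> omega
            have h2 : (parts.flatten ++ ones).length = parts.flatten.length + (pvIntOf ds).toNat := by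
              simp [honeslen] <;> omega
            rw [h1, h2]
            simp
      · -- head is not a digit, running is empty
        have hd' : PySem.Chars.isdigit c = false := by simpa using hd
        by_cases hcar : c = '^'
        · have hcary : PySem.Chars.isdigit '^' = false := by decide
          have hstep : pvAstep (([] : List Char), parts.flatten, false, mm) c
              = ([], parts.flatten, true, mm) := by simp [pvAstep, hd', hcar, hcary]
          set r3 := rest.dropWhile (fun d => !PySem.Chars.isdigit d) with hr3
          have hsplit2 : rest.takeWhile (fun d => !PySem.Chars.isdigit d) ++ r3 = rest :=
            List.takeWhile_append_dropWhile
          have hskipdig : ∀ x ∈ rest.takeWhile (fun d => !PySem.Chars.isdigit d),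
              PySem.Chars.isdigit x = false := by
            intro x hx; have := List.mem_takeWhile_imp hx; simpa using this
          have hr3head : ∀ x, r3.head? = some x → PySem.Chars.isdigit x = true := by
            intro x hx
            have := List.head?_dropWhile_not (fun d => !PySem.Chars.isdigit d) rest
            rw [← hr3, hx] at this; simpa using this
          have hr3len : r3.length ≤ n := by
            have := List.length_dropWhile_le (fun d => !PySem.Chars.isdigit d) rest
            rw [← hr3] at this
            simp at hlen; omega
          have ihr3 := ih r3 hr3len t parts mm
          have hBrw : pvBgo t (c :: rest) parts.flatten.length parts mm
              = pvBgo t r3 parts.flatten.length parts mm := by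
            rw [pvBgo]
            simp [hd', hcar, hcary, ← hr3]
          rw [hBrw, ← ihr3]
          calc pvAfin t (List.foldl pvAstep (([] : List Char), parts.flatten, false, mm) (c :: rest))
              = pvAfin t (List.foldl pvAstep (([] : List Char), parts.flatten, true, mm) rest) := by
                rw [List.foldl_cons, hstep]
            _ = pvAfin t (List.foldl pvAstep (([] : List Char), parts.flatten, true, mm) r3) := by
                rw [← hsplit2, List.foldl_append, pvA_skip _ hskipdig]
            _ = _ := pvA_ignore_irrel t r3 hr3head _ _
        · -- mismatch char with nothing to flush
          have hstep : pvAstep (([] : List Char), parts.flatten, false, mm) c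
              = ([], parts.flatten ++ ['0'], false, mm ++ [((parts.flatten.length : Nat) : Int)]) := by
            simp [pvAstep, hd', hcar]
          have hr2len : rest.length ≤ n := by simp at hlen; omega
          have ihr2 := ih rest hr2len t (parts ++ [['0']]) (mm ++ [((parts.flatten.length : Nat) : Int)])
          have hflat : (parts ++ [['0']]).flatten = parts.flatten ++ ['0'] := by simp
          rw [hflat] at ihr2
          rw [List.foldl_cons, hstep, ihr2]
          have hBrw : pvBgo t (c :: rest) parts.flatten.length parts mm
              = pvBgo t rest (parts.flatten.length + 1) (parts ++ [['0']])
                  (mm ++ [((parts.flatten.length : Nat) : Int)]) := by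
            rw [pvBgo]
            simp [hd', hcar]
          rw [hBrw]
          have h1 : (parts.flatten ++ ['0']).length = parts.flatten.length + 1 := by simp
          rw [h1]

-- ===== VERDICT (by name: the statement is the Claim_ definition above) =====
theorem convert_md2bit_nucmer_del_spec : Claim_equal_convert_md2bit_nucmer_del := by
  intro s tstart _
  unfold Spec_convert_md2bit_nucmer_del convert_md2bit_nucmer_del convert_md2bit_nucmer_del_alt
  have h := pvMain s.toList.length s.toList le_rfl tstart [] []
  simp only [List.flatten_nil, List.length_nil] at h
  rw [h]
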